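-- pv_equiv track=rewrite | github.com/LilianaHo/HomebrewEncryptor | decryptor.py | find_fib
-- ===== SOURCE A (Python) =====
-- def fib_decode(code):
--     fib = [1, 2]
--     decoded_value = 0
--     # checks if fib number included in fib code, if so tallies it
--     for i in range(len(code) - 1):
--         fib.append(fib[-1] + fib[-2])
--         if code[i] == "1":
--             decoded_value += fib[i]
--     return decoded_value
--
-- def find_fib(code, current):
--     start = current
--     prev = 0
--     # makes sure we aren't already near the end of binary
--     if current < len(code) - 1:
--         done = False
--     else:
--         done = True
--     # traverses binary
--     while not done:
--         if code[current] == "1" and prev == "1":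
--             done = True
--         prev = code[current]
--         current += 1
--         if current > len(code) - 1:
--             done = True
--     fib = fib_decode(code[start:current])
--     return fib, current
-- ===== SOURCE B (Python) =====
-- def find_fib(code, current):
--     n = len(code)
--     if current >= n - 1:
--         return 0, current
--     total, a, b = 0, 1, 2
--     i = current + 1
--     while i < n:
--         if code[i - 1] == "1":
--             total += a
--             if code[i] == "1":
--                 return total, i + 1
--         a, b = b, a + b
--         i += 1
--     return total, n
-- ===== Notes on version B (the rewrite author's own statement) =====
-- stated objective: simpler
-- what changed: Replaced A's two staged passes (a while-loop state machine that finds the terminator, then a fib_decode pass that re-reads the slice while growing a Fibonacci list) by ONE fused forward scan that never slices: it commits the previous character's rolling Fibonacci weight before testing the current one, so terminator detection and decoding happen in the same loop with O(1) extra space.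
-- outside the precondition, e.g. on find_fib('0110', -2): A returns (0, 3), B returns (6, 3)
import Mathlib
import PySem

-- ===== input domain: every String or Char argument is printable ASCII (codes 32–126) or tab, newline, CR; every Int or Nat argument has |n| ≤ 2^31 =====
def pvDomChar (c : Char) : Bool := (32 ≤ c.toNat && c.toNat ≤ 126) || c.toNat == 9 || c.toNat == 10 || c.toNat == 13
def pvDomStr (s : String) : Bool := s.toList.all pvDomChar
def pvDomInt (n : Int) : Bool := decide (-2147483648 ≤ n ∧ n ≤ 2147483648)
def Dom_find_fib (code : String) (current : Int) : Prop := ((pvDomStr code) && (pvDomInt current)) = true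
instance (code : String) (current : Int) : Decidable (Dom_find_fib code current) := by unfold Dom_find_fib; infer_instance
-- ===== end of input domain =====

-- B fuses A's two staged passes (terminator-finding while loop, then a fib_decode pass over the
-- slice that grows a Fibonacci list) into ONE forward scan with a rolling Fibonacci pair that
-- commits the previous character's weight before testing the current one (objective: simpler).

-- ===== PORT A =====

def fib_decode (code : List Char) : Int :=
  ((PySem.List.pyRange 0 ((code.length : Int) - 1) 1).foldl
    (fun (st : List Int × Int) i =>
      let fib := st.1 ++ [(PySem.List.pyGetD st.1 (-1) 0) + (PySem.List.pyGetD st.1 (-2) 0)]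
      let dv := if PySem.List.pyGet? code i = some '1' then st.2 + PySem.List.pyGetD fib i 0 else st.2
      (fib, dv))
    ([1, 2], 0)).2

def findFibLoopA (cs : List Char) (n : Int) (current : Int) (prev : Option Char) : Int :=
  if ((PySem.List.pyGet? cs current == some '1') && (prev == some '1'))
       || decide (current + 1 > n - 1) then current + 1
  else findFibLoopA cs n (current + 1) (PySem.List.pyGet? cs current)
termination_by (n - current).toNat
decreasing_by
  rename_i h
  simp only [Bool.or_eq_true, decide_eq_true_eq, not_or] at h
  omega

def find_fib (code : String) (current : Int) : Int × Int :=
  let cs := code.toList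
  let n : Int := (cs.length : Int)
  let start := current
  let current' := if current < n - 1 then findFibLoopA cs n current none else current
  (fib_decode (PySem.List.slice cs (some start) (some current')), current')

-- ===== PORT B =====
def findFibLoopB (cs : List Char) (n : Int) (i : Int) (a : Int) (b : Int) (total : Int) : Int × Int :=
  if _h : i ≥ n then (total, n)
  else if PySem.List.pyGet? cs (i - 1) == some '1' then
    if PySem.List.pyGet? cs i == some '1' then (total + a, i + 1)
    else findFibLoopB cs n (i + 1) b (a + b) (total + a)
  else findFibLoopB cs n (i + 1) b (a + b) total
termination_by (n - i).toNat
decreasing_by all_goals omega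

def find_fib_alt (code : String) (current : Int) : Int × Int :=
  let cs := code.toList
  let n : Int := (cs.length : Int)
  if current ≥ n - 1 then (0, current)
  else findFibLoopB cs n (current + 1) 1 2 0

-- ===== PRECONDITION & SPEC =====
-- Pre_ excludes negative current with current < len(code)-1: for current < -len A raises
-- IndexError, and for -len ≤ current < 0 both programs' results are accidents of Python's
-- negative-index wraparound (A decodes a slice unrelated to the characters its scan read,
-- B decodes the wrapped characters it read) — a corner no caller would specify.
def Pre_find_fib (code : String) (current : Int) : Prop :=
  current < (code.toList.length : Int) - 1 → 0 ≤ current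
instance (code : String) (current : Int) : Decidable (Pre_find_fib code current) := by
  unfold Pre_find_fib; infer_instance

def pvWitness_find_fib : String × Int := ("0110", 0)

def Spec_find_fib (code : String) (current : Int) (out : Int × Int) : Prop := out = find_fib_alt code current
instance (code : String) (current : Int) (out : Int × Int) : Decidable (Spec_find_fib code current out) := by unfold Spec_find_fib; infer_instance

-- ===== CLAIM (what is proved, stated in full; the proofs are below) =====
def Claim_equal_find_fib : Prop := ∀ (code : String) (current : Int), Dom_find_fib code current → Pre_find_fib code current → Spec_find_fib code current (find_fib code current)

-- ===== LEMMAS AND PROOFS =====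
def pvF : Nat → Int
  | 0 => 1
  | 1 => 2
  | k + 2 => pvF k + pvF (k + 1)

def pvDec : List Char → Nat → Int
  | [], _ => 0
  | ch :: r, k => (if ch = '1' then pvF k else 0) + pvDec r (k + 1)

theorem pvDec_eq_sum (xs : List Char) (k : Nat) :
    pvDec xs k = ∑ i ∈ Finset.range xs.length, (if xs.getD i ' ' = '1' then pvF (k + i) else 0) := by
  induction xs generalizing k with
  | nil => simp [pvDec]
  | cons ch r ih =>
    rw [pvDec, ih (k + 1), List.length_cons, Finset.sum_range_succ']
    simp only [List.getD_cons_succ, List.getD_cons_zero, Nat.add_zero]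
    rw [add_comm]
    congr 1
    apply Finset.sum_congr rfl
    intro i _
    have h3 : k + 1 + i = k + (i + 1) := by omega
    rw [h3]

theorem foldA_eq (L : List Char) (m : Nat) :
    (PySem.List.pyRange 0 (m : Int) 1).foldl
      (fun (st : List Int × Int) i =>
        let fib := st.1 ++ [(PySem.List.pyGetD st.1 (-1) 0) + (PySem.List.pyGetD st.1 (-2) 0)]
        let dv := if PySem.List.pyGet? L i = some '1' then st.2 + PySem.List.pyGetD fib i 0 else st.2
        (fib, dv))
      ([1, 2], 0)
    = ((List.range (m + 2)).map pvF,
       ∑ i ∈ Finset.range m, (if PySem.List.pyGet? L ((i : Nat) : Int) = some '1' then pvF i else 0)) := by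
  induction m with
  | zero =>
    rw [show ((0 : Nat) : Int) = 0 from rfl, PySem.List.pyRange_one_eq_nil (by omega)]
    simp [List.range_succ, pvF]
  | succ m ih =>
    rw [show ((m + 1 : Nat) : Int) = (m : Int) + 1 by push_cast; ring,
        PySem.List.pyRange_one_succ_right (by positivity), List.foldl_append, ih]
    simp only [List.foldl_cons, List.foldl_nil]
    have hm1 : PySem.List.pyGetD ((List.range (m + 2)).map pvF) (-1) 0 = pvF (m + 1) := by
      rw [show List.range (m + 2) = List.range (m + 1) ++ [m + 1] from List.range_succ,
          List.map_append]
      exact PySem.List.pyGetD_neg_one_append_singleton _ _ _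
    have hm2 : PySem.List.pyGetD ((List.range (m + 2)).map pvF) (-2) 0 = pvF m := by
      rw [PySem.List.pyGetD_neg_ofNat _ 2 0 (by omega) (by simp)]
      simp
    rw [hm1, hm2]
    have hfib : (List.range (m + 2)).map pvF ++ [pvF (m + 1) + pvF m]
        = (List.range (m + 3)).map pvF := by
      rw [show List.range (m + 3) = List.range (m + 2) ++ [m + 2] from List.range_succ,
          List.map_append]
      simp [pvF, add_comm]
    have hidx : PySem.List.pyGetD ((List.range (m + 2)).map pvF ++ [pvF (m + 1) + pvF m]) ((m : Nat) : Int) 0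
        = pvF m := by
      rw [PySem.List.pyGetD_natCast]
      rw [List.getD_eq_getElem _ _ (by simp)]
      rw [List.getElem_append_left (by simp)]
      simp
    rw [hfib] at hidx ⊢
    rw [hidx, Finset.sum_range_succ]
    split_ifs <;> simp

theorem decode_eq (L : List Char) : fib_decode L = pvDec L.dropLast 0 := by
  rcases L.eq_nil_or_concat with rfl | ⟨M, x, rfl⟩
  · simp [fib_decode, pvDec, PySem.List.pyRange_one_eq_nil]
  · simp only [List.concat_eq_append, fib_decode]
    have hlen : ((M ++ [x]).length : Int) - 1 = ((M.length : Nat) : Int) := by simp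
    rw [hlen, foldA_eq (M ++ [x]) M.length]
    have hdrop : (M ++ [x]).dropLast = M := by simp
    rw [hdrop, pvDec_eq_sum]
    dsimp only
    apply Finset.sum_congr rfl
    intro i hi
    rw [Finset.mem_range] at hi
    have hget : PySem.List.pyGet? (M ++ [x]) ((i : Nat) : Int) = some M[i] := by
      rw [PySem.List.pyGet?_natCast, List.getElem?_append_left (by omega),
          List.getElem?_eq_getElem (by omega)]
    rw [hget, List.getD_eq_getElem _ _ (by omega)]
    simp

theorem loopA_bounds (cs : List Char) (j : Int) (prev : Option Char)
    (h : j ≤ (cs.length : Int) - 1) :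
    j + 1 ≤ findFibLoopA cs (cs.length : Int) j prev ∧
      findFibLoopA cs (cs.length : Int) j prev ≤ (cs.length : Int) := by
  rw [findFibLoopA]
  split_ifs with hc
  · omega
  · simp only [Bool.or_eq_true, decide_eq_true_eq, not_or] at hc
    have := loopA_bounds cs (j + 1) (PySem.List.pyGet? cs j) (by omega)
    omega
termination_by ((cs.length : Int) - j).toNat
decreasing_by omega

theorem loopB_eq (cs : List Char) (j : Int) (k : Nat) (t : Int)
    (h1 : 1 ≤ j) (h2 : j ≤ (cs.length : Int) - 1) :
    findFibLoopB cs (cs.length : Int) j (pvF k) (pvF (k + 1)) t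
      = (t + pvDec ((cs.drop (j.toNat - 1)).take
            ((findFibLoopA cs (cs.length : Int) j (PySem.List.pyGet? cs (j - 1))).toNat - j.toNat)) k,
         findFibLoopA cs (cs.length : Int) j (PySem.List.pyGet? cs (j - 1))) := by
  have hjlen : j.toNat - 1 < cs.length := by omega
  have hjlen' : j.toNat < cs.length := by omega
  have hp : PySem.List.pyGet? cs (j - 1) = some (cs[j.toNat - 1]'hjlen) := by
    rw [show j - 1 = ((j.toNat - 1 : Nat) : Int) by omega, PySem.List.pyGet?_natCast,
        List.getElem?_eq_getElem hjlen]
  have hcu : PySem.List.pyGet? cs j = some (cs[j.toNat]'hjlen') := by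
    conv_lhs => rw [show j = ((j.toNat : Nat) : Int) by omega]
    rw [PySem.List.pyGet?_natCast, List.getElem?_eq_getElem hjlen']
  have hdropc : cs.drop (j.toNat - 1) = (cs[j.toNat - 1]'hjlen) :: cs.drop j.toNat := by
    rw [List.drop_eq_getElem_cons hjlen, show j.toNat - 1 + 1 = j.toNat by omega]
  have hF2 : pvF k + pvF (k + 1) = pvF (k + 2) := rfl
  rw [findFibLoopB, dif_neg (by omega), findFibLoopA, hp, hcu]
  by_cases hP : (cs[j.toNat - 1]'hjlen) = '1' <;>
    by_cases hC : (cs[j.toNat]'hjlen') = '1'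
  · -- both '1': terminator, e = j + 1
    have hAc : ((some (cs[j.toNat]'hjlen') == some '1') && (some (cs[j.toNat - 1]'hjlen) == some '1')
        || decide (j + 1 > (cs.length : Int) - 1)) = true := by simp [hP, hC]
    have hB1 : ((some (cs[j.toNat - 1]'hjlen) == some '1') = true) := by simp [hP]
    have hB2 : ((some (cs[j.toNat]'hjlen') == some '1') = true) := by simp [hC]
    rw [if_pos hAc, if_pos hB1, if_pos hB2, hdropc,
        show (j + 1).toNat - j.toNat = 1 by omega]
    simp [pvDec, hP]
  · -- prev '1', cur not '1'
    have hB1 : ((some (cs[j.toNat - 1]'hjlen) == some '1') = true) := by simp [hP]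
    have hB2 : ¬ ((some (cs[j.toNat]'hjlen') == some '1') = true) := by simp [hC]
    rw [if_pos hB1, if_neg hB2]
    by_cases hd : j + 1 > (cs.length : Int) - 1
    · have hAc : ((some (cs[j.toNat]'hjlen') == some '1') && (some (cs[j.toNat - 1]'hjlen) == some '1')
          || decide (j + 1 > (cs.length : Int) - 1)) = true := by simp [hd]
      rw [if_pos hAc, findFibLoopB, dif_pos (show j + 1 ≥ (cs.length : Int) by omega),
          hdropc, show (j + 1).toNat - j.toNat = 1 by omega,
          show j + 1 = ((cs.length : Nat) : Int) by omega]
      simp [pvDec, hP]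
    · have hAc : ¬ (((some (cs[j.toNat]'hjlen') == some '1') && (some (cs[j.toNat - 1]'hjlen) == some '1')
          || decide (j + 1 > (cs.length : Int) - 1)) = true) := by simp [hC, hd]
      rw [if_neg hAc]
      have hb := loopA_bounds cs (j + 1) (PySem.List.pyGet? cs j) (by omega)
      have ih := loopB_eq cs (j + 1) (k + 1) (t + pvF k) (by omega) (by omega)
      rw [show j + 1 - 1 = j by ring, show (j + 1).toNat - 1 = j.toNat by omega, hcu] at ih
      rw [hF2, ih]
      rw [hcu] at hb
      set e := findFibLoopA cs (cs.length : Int) (j + 1) (some (cs[j.toNat]'hjlen')) with he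
      rw [hdropc, show e.toNat - j.toNat = (e.toNat - (j + 1).toNat) + 1 by omega,
          List.take_succ_cons]
      simp only [pvDec, if_pos hP, Prod.mk.injEq]
      exact ⟨by ring, trivial⟩
  · -- prev not '1', cur '1' (no pair)
    have hB1 : ¬ ((some (cs[j.toNat - 1]'hjlen) == some '1') = true) := by simp [hP]
    rw [if_neg hB1]
    by_cases hd : j + 1 > (cs.length : Int) - 1
    · have hAc : ((some (cs[j.toNat]'hjlen') == some '1') && (some (cs[j.toNat - 1]'hjlen) == some '1')
          || decide (j + 1 > (cs.length : Int) - 1)) = true := by simp [hd]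
      rw [if_pos hAc, findFibLoopB, dif_pos (show j + 1 ≥ (cs.length : Int) by omega),
          hdropc, show (j + 1).toNat - j.toNat = 1 by omega,
          show j + 1 = ((cs.length : Nat) : Int) by omega]
      simp [pvDec, hP]
    · have hAc : ¬ (((some (cs[j.toNat]'hjlen') == some '1') && (some (cs[j.toNat - 1]'hjlen) == some '1')
          || decide (j + 1 > (cs.length : Int) - 1)) = true) := by simp [hP, hd]
      rw [if_neg hAc]
      have hb := loopA_bounds cs (j + 1) (PySem.List.pyGet? cs j) (by omega)
      have ih := loopB_eq cs (j + 1) (k + 1) t (by omega) (by omega)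
      rw [show j + 1 - 1 = j by ring, show (j + 1).toNat - 1 = j.toNat by omega, hcu] at ih
      rw [hF2, ih]
      rw [hcu] at hb
      set e := findFibLoopA cs (cs.length : Int) (j + 1) (some (cs[j.toNat]'hjlen')) with he
      rw [hdropc, show e.toNat - j.toNat = (e.toNat - (j + 1).toNat) + 1 by omega,
          List.take_succ_cons]
      simp [pvDec, hP]
  · -- neither '1'
    have hB1 : ¬ ((some (cs[j.toNat - 1]'hjlen) == some '1') = true) := by simp [hP]
    rw [if_neg hB1]
    by_cases hd : j + 1 > (cs.length : Int) - 1
    · have hAc : ((some (cs[j.toNat]'hjlen') == some '1') && (some (cs[j.toNat - 1]'hjlen) == some '1')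
          || decide (j + 1 > (cs.length : Int) - 1)) = true := by simp [hd]
      rw [if_pos hAc, findFibLoopB, dif_pos (show j + 1 ≥ (cs.length : Int) by omega),
          hdropc, show (j + 1).toNat - j.toNat = 1 by omega,
          show j + 1 = ((cs.length : Nat) : Int) by omega]
      simp [pvDec, hP]
    · have hAc : ¬ (((some (cs[j.toNat]'hjlen') == some '1') && (some (cs[j.toNat - 1]'hjlen) == some '1')
          || decide (j + 1 > (cs.length : Int) - 1)) = true) := by simp [hC, hd]
      rw [if_neg hAc]
      have hb := loopA_bounds cs (j + 1) (PySem.List.pyGet? cs j) (by omega)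
      have ih := loopB_eq cs (j + 1) (k + 1) t (by omega) (by omega)
      rw [show j + 1 - 1 = j by ring, show (j + 1).toNat - 1 = j.toNat by omega, hcu] at ih
      rw [hF2, ih]
      rw [hcu] at hb
      set e := findFibLoopA cs (cs.length : Int) (j + 1) (some (cs[j.toNat]'hjlen')) with he
      rw [hdropc, show e.toNat - j.toNat = (e.toNat - (j + 1).toNat) + 1 by omega,
          List.take_succ_cons]
      simp [pvDec, hP]
termination_by ((cs.length : Int) - j).toNat
decreasing_by all_goals omega

theorem main_eq (code : String) (current : Int)
    (hpre : current < (code.toList.length : Int) - 1 → 0 ≤ current) :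
    find_fib code current = find_fib_alt code current := by
  by_cases hc : current < (code.toList.length : Int) - 1
  · have h0 := hpre hc
    simp only [find_fib, find_fib_alt, if_pos hc,
      if_neg (show ¬ current ≥ (code.toList.length : Int) - 1 by omega)]
    set cs := code.toList with hcs
    have hcun : current.toNat < cs.length := by omega
    have hcu : PySem.List.pyGet? cs current = some (cs[current.toNat]'hcun) := by
      conv_lhs => rw [show current = ((current.toNat : Nat) : Int) by omega]
      rw [PySem.List.pyGet?_natCast, List.getElem?_eq_getElem hcun]
    have hA : findFibLoopA cs (cs.length : Int) current none
        = findFibLoopA cs (cs.length : Int) (current + 1) (PySem.List.pyGet? cs current) := by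
      rw [findFibLoopA, if_neg (by simp; omega)]
    have hb := loopA_bounds cs (current + 1) (PySem.List.pyGet? cs current) (by omega)
    have ih := loopB_eq cs (current + 1) 0 0 (by omega) (by omega)
    rw [show current + 1 - 1 = current by ring, show (current + 1).toNat - 1 = current.toNat by omega] at ih
    rw [show (pvF 0) = (1 : Int) from rfl, show (pvF (0 + 1)) = (2 : Int) from rfl] at ih
    rw [hA, ih]
    set e := findFibLoopA cs (cs.length : Int) (current + 1) (PySem.List.pyGet? cs current) with he
    have hsl : PySem.List.slice cs (some current) (some e)
        = (cs.drop current.toNat).take (e.toNat - current.toNat) :=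
      PySem.List.slice_toNat _ (by omega) (by omega)
    rw [hsl, decode_eq]
    have hlen : ((cs.drop current.toNat).take (e.toNat - current.toNat)).length
        = e.toNat - current.toNat := by
      simp
      omega
    rw [List.dropLast_eq_take, hlen, List.take_take,
        show min (e.toNat - current.toNat - 1) (e.toNat - current.toNat)
          = e.toNat - (current + 1).toNat by omega]
    simp
  · simp only [find_fib, find_fib_alt, if_neg hc,
      if_pos (show current ≥ (code.toList.length : Int) - 1 by omega)]
    have hsl : PySem.List.slice code.toList (some current) (some current) = [] := by
      apply List.eq_nil_of_length_eq_zero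
      rw [PySem.List.length_slice]
      omega
    rw [hsl]
    simp [fib_decode, PySem.List.pyRange_one_eq_nil]

-- ===== VERDICT (by name: the statement is the Claim_ definition above) =====
theorem find_fib_spec : Claim_equal_find_fib := by
  intro code current _hdom hpre
  unfold Spec_find_fib
  exact main_eq code current hpre
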